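-- pv_equiv track=rewrite | github.com/Nicola92-byte/UFP_estimator | Agente_logging.py | quick_pre_analysis
-- ===== SOURCE A (Python) =====
-- def quick_pre_analysis(requirements_text):
--     lines = requirements_text.splitlines()
--     rf_count = sum(1 for line in lines if "RF" in line)
--     text_lower = requirements_text.lower()
--     keywords = {
--         "nomine": 2, "matching": 2, "cas": 1, "sas": 1,
--         "backlog": 2, "gui": 1, "db": 1,
--         "design thinking": 2, "microservizi": 2
--     }
--     score = sum(text_lower.count(kw) * weight for kw, weight in keywords.items()) + rf_count
--     if score < 5:
--         suggested_range = "20–30"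
--     elif score < 10:
--         suggested_range = "25–35"
--     elif score < 15:
--         suggested_range = "30–40"
--     elif score < 20:
--         suggested_range = "35–45"
--     else:
--         suggested_range = "40–50"
--     return f"Numero di requisiti (RF) trovati: {rf_count}\nScore totale: {score}\nRange ipotizzato: {suggested_range}\n"
-- ===== SOURCE B (Python) =====
-- def _count_nonoverlap(s, sub):
--     # greedy non-overlapping occurrence count via an explicit find-and-jump loop
--     n = 0
--     while True:
--         i = s.find(sub)
--         if i == -1:
--             return n
--         n += 1
--         s = s[i + len(sub):]
--
--
-- def quick_pre_analysis(requirements_text):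
--     # one-pass state machine over the characters: count lines containing "RF"
--     rf_count = 0
--     prev_r = False
--     has_rf = False
--     for c in requirements_text:
--         if c == '\n' or c == '\r':
--             if has_rf:
--                 rf_count += 1
--             prev_r = False
--             has_rf = False
--         else:
--             if prev_r and c == 'F':
--                 has_rf = True
--             prev_r = (c == 'R')
--     if has_rf:
--         rf_count += 1
--     low = requirements_text.lower()
--     score = rf_count
--     for kw, w in (("nomine", 2), ("matching", 2), ("cas", 1), ("sas", 1),
--                   ("backlog", 2), ("gui", 1), ("db", 1),
--                   ("design thinking", 2), ("microservizi", 2)):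
--         score += _count_nonoverlap(low, kw) * w
--     lo = 20 + 5 * min(score // 5, 4)
--     return (f"Numero di requisiti (RF) trovati: {rf_count}\n"
--             f"Score totale: {score}\n"
--             f"Range ipotizzato: {lo}\u2013{lo + 10}\n")
-- ===== Notes on version B (the rewrite author's own statement) =====
-- stated objective: alternative
-- what changed: B counts RF-lines with a single character-level state machine (no splitlines, no per-line membership scan), counts each keyword with an explicit greedy find-and-jump loop instead of str.count, and replaces the five-branch if/elif ladder with the closed-form bucket 20+5*min(score//5,4).
import Mathlib
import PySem

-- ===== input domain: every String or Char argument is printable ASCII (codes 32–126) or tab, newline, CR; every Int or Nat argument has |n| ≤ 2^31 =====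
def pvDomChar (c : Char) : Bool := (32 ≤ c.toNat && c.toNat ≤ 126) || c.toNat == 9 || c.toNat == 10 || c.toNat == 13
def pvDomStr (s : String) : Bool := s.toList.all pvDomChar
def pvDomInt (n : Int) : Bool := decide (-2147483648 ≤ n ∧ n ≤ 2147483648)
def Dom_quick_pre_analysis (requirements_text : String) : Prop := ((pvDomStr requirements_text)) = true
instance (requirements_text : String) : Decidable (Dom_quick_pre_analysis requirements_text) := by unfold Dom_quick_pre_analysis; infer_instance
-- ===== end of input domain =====

-- B replaces A's splitlines + per-line "RF" membership test by a one-pass character state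
-- machine, A's str.count per keyword by an explicit greedy find-and-jump loop, and A's
-- five-branch ladder by the closed-form bucket 20+5*min(score//5,4) (objective: alternative).

-- ===== PORT A =====
def quickLadderA (score : Int) : String :=
  if score < 5 then "20–30"
  else if score < 10 then "25–35"
  else if score < 15 then "30–40"
  else if score < 20 then "35–45"
  else "40–50"

def quick_pre_analysis (requirements_text : String) : String :=
  let lines := PySem.Str.splitlines requirements_text
  let rf_count : Int := lines.foldl (fun acc line => if PySem.Str.isIn "RF" line then acc + 1 else acc) 0
  let text_lower := PySem.Str.lower requirements_text
  let keywords : PySem.Dict String Int := PySem.Dict.ofList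
    [("nomine", 2), ("matching", 2), ("cas", 1), ("sas", 1),
     ("backlog", 2), ("gui", 1), ("db", 1),
     ("design thinking", 2), ("microservizi", 2)]
  let score : Int :=
    (keywords.items.foldl (fun acc kw => acc + (PySem.Str.count text_lower kw.1 : Int) * kw.2) 0) + rf_count
  let suggested_range := quickLadderA score
  PySem.Str.join "" ["Numero di requisiti (RF) trovati: ", PySem.Int.toStr rf_count,
    "\nScore totale: ", PySem.Int.toStr score, "\nRange ipotizzato: ", suggested_range, "\n"]

-- ===== PORT B =====
-- Source B's _count_nonoverlap while-loop: find, jump past the match, repeat (s[k:] = List.drop k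
-- since the jump index is nonnegative; fuel s.length+1 only makes the loop total — the loop
-- consumes at least one character per iteration, so the fuel is never exhausted).
def quickCntGo (sub : List Char) : Nat → List Char → Nat → Nat
  | 0, _, n => n
  | fuel + 1, s, n =>
      let i := PySem.Chars.find s sub
      if i = -1 then n else quickCntGo sub fuel (s.drop (i.toNat + sub.length)) (n + 1)

def quickCountNonoverlap (s : String) (sub : String) : Nat :=
  quickCntGo sub.toList (s.toList.length + 1) s.toList 0

-- Source B's character loop: state (rf_count, prev_r, has_rf), final flush of has_rf
def quickRfStep (st : Int × Bool × Bool) (c : Char) : Int × Bool × Bool :=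
  if c = '\n' ∨ c = '\x0d' then ((if st.2.2 then st.1 + 1 else st.1), false, false)
  else (st.1, c == 'R', st.2.2 || (st.2.1 && c == 'F'))

def quickRfScan (requirements_text : String) : Int :=
  let st := requirements_text.toList.foldl quickRfStep (0, false, false)
  if st.2.2 then st.1 + 1 else st.1

def quickKeywordsB : List (String × Int) :=
  [("nomine", 2), ("matching", 2), ("cas", 1), ("sas", 1),
   ("backlog", 2), ("gui", 1), ("db", 1),
   ("design thinking", 2), ("microservizi", 2)]

def quickRangeB (score : Int) : String :=
  let lo := 20 + 5 * min (PySem.Int.floordiv score 5) 4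
  PySem.Str.join "" [PySem.Int.toStr lo, "–", PySem.Int.toStr (lo + 10)]

def quick_pre_analysis_alt (requirements_text : String) : String :=
  let rf_count : Int := quickRfScan requirements_text
  let low := PySem.Str.lower requirements_text
  let score : Int :=
    quickKeywordsB.foldl (fun acc kw => acc + (quickCountNonoverlap low kw.1 : Int) * kw.2) rf_count
  PySem.Str.join "" ["Numero di requisiti (RF) trovati: ", PySem.Int.toStr rf_count,
    "\nScore totale: ", PySem.Int.toStr score, "\nRange ipotizzato: ", quickRangeB score, "\n"]

-- ===== PRECONDITION & SPEC =====
def Spec_quick_pre_analysis (requirements_text : String) (out : String) : Prop := out = quick_pre_analysis_alt requirements_text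
instance (requirements_text : String) (out : String) : Decidable (Spec_quick_pre_analysis requirements_text out) := by unfold Spec_quick_pre_analysis; infer_instance

-- ===== CLAIM (what is proved, stated in full; the proofs are below) =====
def Claim_equal_quick_pre_analysis : Prop := ∀ (requirements_text : String), Dom_quick_pre_analysis requirements_text → Spec_quick_pre_analysis requirements_text (quick_pre_analysis requirements_text)

-- ===== LEMMAS AND PROOFS =====

-- ---- A's str.count characterised by the greedy find/jump recursion ----
theorem quick_go_acc (sub : List Char) (fuel : Nat) : ∀ (s : List Char) (acc : Nat),
    PySem.Chars.count.go sub fuel s acc = acc + PySem.Chars.count.go sub fuel s 0 := by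
  induction fuel with
  | zero => intro s acc; rw [PySem.Chars.count.go, PySem.Chars.count.go]; omega
  | succ fuel ih =>
    intro s acc
    cases s with
    | nil =>
      rw [PySem.Chars.count.go, PySem.Chars.count.go] <;> omega
    | cons c t =>
      rw [PySem.Chars.count.go, PySem.Chars.count.go]
      by_cases h : sub.isPrefixOf (c :: t)
      · simp only [h, if_true]
        rw [ih _ (acc + 1), ih _ (0 + 1)]; omega
      · simp only [h, Bool.false_eq_true, ite_false]
        rw [ih t acc]

theorem quick_go_fuel (sub : List Char) (hsub : sub ≠ []) :
    ∀ (fuel₁ fuel₂ : Nat) (s : List Char) (acc : Nat), s.length ≤ fuel₁ → s.length ≤ fuel₂ →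
    PySem.Chars.count.go sub fuel₁ s acc = PySem.Chars.count.go sub fuel₂ s acc := by
  intro fuel₁
  induction fuel₁ using Nat.strong_induction_on with
  | _ fuel₁ ih =>
    intro fuel₂ s acc h1 h2
    cases s with
    | nil =>
      cases fuel₁ <;> cases fuel₂ <;> simp [PySem.Chars.count.go]
    | cons c t =>
      cases fuel₁ with
      | zero => simp at h1
      | succ f1 =>
        cases fuel₂ with
        | zero => simp at h2
        | succ f2 =>
          rw [PySem.Chars.count.go, PySem.Chars.count.go]
          have hs : 1 ≤ sub.length := by
            cases sub with
            | nil => exact absurd rfl hsub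
            | cons a b => simp
          by_cases h : sub.isPrefixOf (c :: t)
          · simp only [h, if_true]
            have hlen : sub.length ≤ (c :: t).length :=
              List.IsPrefix.length_le (List.isPrefixOf_iff_prefix.mp h)
            apply ih f1 (by omega) f2
            · simp only [List.length_drop]; simp at h1 ⊢; omega
            · simp only [List.length_drop]; simp at h2 ⊢; omega
          · simp only [h, Bool.false_eq_true, ite_false]
            apply ih f1 (by omega) f2 <;> simp at h1 h2 ⊢ <;> omega

theorem quick_count_cons_not_prefix (sub : List Char) (hsub : sub ≠ []) (c : Char) (t : List Char)
    (h : ¬ sub.isPrefixOf (c :: t)) :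
    PySem.Chars.count (c :: t) sub = PySem.Chars.count t sub := by
  unfold PySem.Chars.count
  rw [if_neg (by simp [hsub]), if_neg (by simp [hsub])]
  simp only [List.length_cons]
  rw [PySem.Chars.count.go]
  simp only [h, Bool.false_eq_true, ite_false]

theorem quick_count_prefix (sub : List Char) (hsub : sub ≠ []) (s : List Char)
    (h : sub.isPrefixOf s) :
    PySem.Chars.count s sub = 1 + PySem.Chars.count (s.drop sub.length) sub := by
  have hs : 1 ≤ sub.length := by
    cases sub with
    | nil => exact absurd rfl hsub
    | cons a b => simp
  cases s with
  | nil =>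
    have hp := List.isPrefixOf_iff_prefix.mp h
    rw [List.prefix_nil] at hp
    exact absurd hp hsub
  | cons c t =>
    unfold PySem.Chars.count
    rw [if_neg (by simp [hsub])]
    conv_lhs => rw [List.length_cons, PySem.Chars.count.go]
    simp only [h, if_true]
    have hlen : sub.length ≤ (c :: t).length :=
      List.IsPrefix.length_le (List.isPrefixOf_iff_prefix.mp h)
    rw [quick_go_acc]
    have : PySem.Chars.count.go sub (c :: t).length.pred (List.drop sub.length (c :: t)) 0
        = PySem.Chars.count.go sub (List.drop sub.length (c :: t)).length (List.drop sub.length (c :: t)) 0 := by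
      apply quick_go_fuel sub hsub
      · simp only [List.length_drop]; simp at hlen ⊢; omega
      · exact le_refl _
    simp only [List.length_cons, Nat.pred_succ] at this ⊢
    rw [this, if_neg (by simp [hsub])]

theorem quick_count_no_occ (sub : List Char) (hsub : sub ≠ []) (s : List Char)
    (h : PySem.Chars.find s sub = -1) :
    PySem.Chars.count s sub = 0 := by
  induction s with
  | nil =>
    unfold PySem.Chars.count
    rw [if_neg (by simp [hsub])]
    simp only [List.length_nil]
    rw [PySem.Chars.count.go]
  | cons c t ih =>
    have hni : ¬ sub <:+: (c :: t) := (PySem.Chars.find_eq_neg_one_iff _ _).mp h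
    have hnp : ¬ sub.isPrefixOf (c :: t) := by
      intro hp
      exact hni (List.IsPrefix.isInfix (List.isPrefixOf_iff_prefix.mp hp))
    rw [quick_count_cons_not_prefix sub hsub c t hnp]
    apply ih
    apply (PySem.Chars.find_eq_neg_one_iff _ _).mpr
    intro hi
    exact hni (List.infix_cons hi)

theorem quick_count_find (sub : List Char) (hsub : sub ≠ []) :
    ∀ (s : List Char), PySem.Chars.find s sub ≠ -1 →
    PySem.Chars.count s sub
      = 1 + PySem.Chars.count (s.drop ((PySem.Chars.find s sub).toNat + sub.length)) sub := by
  intro s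
  induction hlen : s.length using Nat.strong_induction_on generalizing s with
  | _ n ih =>
    intro h
    have hocc : sub <:+: s := (PySem.Chars.find_ne_neg_one_iff _ _).mp h
    have hnn : 0 ≤ PySem.Chars.find s sub := (PySem.Chars.find_nonneg_iff _ _).mpr hocc
    obtain ⟨hpref, hmin⟩ := PySem.Chars.find_spec hnn
    cases hk : (PySem.Chars.find s sub).toNat with
    | zero =>
      simp only [hk, List.drop_zero, Nat.zero_add] at hpref ⊢
      exact quick_count_prefix sub hsub s (List.isPrefixOf_iff_prefix.mpr hpref)
    | succ k' =>
      cases s with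
      | nil =>
        exfalso
        rw [hk] at hpref
        simp at hpref
        exact hsub hpref
      | cons c t =>
        have hnp : ¬ sub.isPrefixOf (c :: t) := by
          intro hp
          have := hmin 0 (by omega)
          simp at this
          exact this (List.isPrefixOf_iff_prefix.mp hp)
        have hpreft : sub <+: t.drop k' := by
          rw [hk] at hpref
          simpa [List.drop_succ_cons] using hpref
        have hocct : sub <:+: t :=
          (PySem.Chars.isIn_iff_infix _ _).mp
            ((PySem.Chars.exists_prefix_drop_iff_isIn (s := t) (sub := sub)).mp ⟨k', hpreft⟩)
        have hnt : PySem.Chars.find t sub ≠ -1 := (PySem.Chars.find_ne_neg_one_iff _ _).mpr hocct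
        have hnnt : 0 ≤ PySem.Chars.find t sub := (PySem.Chars.find_nonneg_iff _ _).mpr hocct
        obtain ⟨hpt, hmt⟩ := PySem.Chars.find_spec hnnt
        have hft : (PySem.Chars.find t sub).toNat = k' := by
          by_contra hne
          rcases Nat.lt_or_ge (PySem.Chars.find t sub).toNat k' with hlt | hge
          · have := hmin ((PySem.Chars.find t sub).toNat + 1) (by omega)
            simp only [List.drop_succ_cons] at this
            exact this hpt
          · have hgt : k' < (PySem.Chars.find t sub).toNat := by omega
            exact hmt k' hgt hpreft
        rw [quick_count_cons_not_prefix sub hsub c t hnp, ih t.length (by simp [← hlen]) t rfl hnt, hft]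
        have harith : k' + 1 + sub.length = (k' + sub.length) + 1 := by omega
        rw [harith, List.drop_succ_cons]

theorem quick_cntGo_eq (sub : List Char) (hsub : sub ≠ []) :
    ∀ (fuel : Nat) (s : List Char) (n : Nat), s.length < fuel →
    quickCntGo sub fuel s n = n + PySem.Chars.count s sub := by
  intro fuel
  induction fuel with
  | zero => intro s n h; omega
  | succ fuel ih =>
    intro s n h
    rw [quickCntGo]
    by_cases hf : PySem.Chars.find s sub = -1
    · simp only [hf, if_pos]
      rw [quick_count_no_occ sub hsub s hf]
      omega
    · simp only [hf, ite_false]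
      have hnn : 0 ≤ PySem.Chars.find s sub := by
        have := PySem.Chars.neg_one_le_find (s := s) (sub := sub)
        omega
      have hs1 : 1 ≤ sub.length := by
        cases sub with
        | nil => exact absurd rfl hsub
        | cons a b => simp
      have hsne : s ≠ [] := by
        intro hnil
        subst hnil
        have : ¬ sub <:+: ([] : List Char) := by
          intro hi
          exact hsub (List.eq_nil_of_infix_nil hi)
        exact hf ((PySem.Chars.find_eq_neg_one_iff _ _).mpr this)
      have hlen : (s.drop ((PySem.Chars.find s sub).toNat + sub.length)).length < fuel := by
        simp only [List.length_drop]
        have hs0 : 1 ≤ s.length := by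
          cases s with
          | nil => exact absurd rfl hsne
          | cons a b => simp
        omega
      rw [ih _ (n + 1) hlen, quick_count_find sub hsub s hf]
      omega

theorem quick_countNonoverlap_eq (s sub : String) (hsub : sub.toList ≠ []) :
    quickCountNonoverlap s sub = PySem.Str.count s sub := by
  unfold quickCountNonoverlap
  rw [quick_cntGo_eq sub.toList hsub _ _ 0 (by omega)]
  simp [PySem.Str.count]

-- ---- B's RF state machine characterised against splitlines ----
def quickHasRF : List Char → Bool
  | [] => false
  | [_] => false
  | c1 :: c2 :: rest => (c1 == 'R' && c2 == 'F') || quickHasRF (c2 :: rest)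

theorem quick_hasRF_iff (l : List Char) : quickHasRF l = true ↔ ['R', 'F'] <:+: l := by
  induction l with
  | nil => simp [quickHasRF]
  | cons c t ih =>
    cases t with
    | nil =>
      simp only [quickHasRF, List.infix_cons_iff]
      constructor
      · intro h; simp at h
      · rintro (h | h)
        · have := h.length_le; simp at this
        · simp at h
    | cons c2 r =>
      rw [quickHasRF]
      simp only [Bool.or_eq_true, Bool.and_eq_true, beq_iff_eq, ih, List.infix_cons_iff]
      constructor
      · rintro (⟨h1, h2⟩ | h)
        · subst h1; subst h2
          exact Or.inl (by simp [List.cons_prefix_cons])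
        · exact Or.inr h
      · rintro (h | h)
        · rw [List.cons_prefix_cons] at h
          obtain ⟨h1, h2⟩ := h
          rw [List.cons_prefix_cons] at h2
          exact Or.inl ⟨h1.symm, h2.1.symm⟩
        · exact Or.inr h

theorem quick_hasRF_eq_isIn (l : List Char) : quickHasRF l = PySem.Chars.isIn ['R', 'F'] l := by
  by_cases h : ['R', 'F'] <:+: l
  · rw [(quick_hasRF_iff l).mpr h, (PySem.Chars.isIn_iff_infix _ _).mpr h]
  · rw [(PySem.Chars.isIn_eq_false_iff _ _).mpr h]
    by_contra hb
    simp only [Bool.not_eq_false] at hb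
    exact h ((quick_hasRF_iff l).mp hb)

theorem quick_hasRF_append (l : List Char) (c : Char) :
    quickHasRF (l ++ [c]) = (quickHasRF l || (l.getLast? == some 'R' && c == 'F')) := by
  induction l with
  | nil => simp [quickHasRF]
  | cons a t ih =>
    cases t with
    | nil => simp [quickHasRF]
    | cons b r =>
      simp only [List.cons_append, quickHasRF]
      rw [show (b :: r) ++ [c] = b :: (r ++ [c]) by simp] at *
      rw [ih]
      simp [List.getLast?_cons_cons, Bool.or_assoc]

def quickPRF : List Char → Bool := fun l => PySem.Chars.isIn ['R', 'F'] l

def quickFlush (st : Int × Bool × Bool) : Int := if st.2.2 then st.1 + 1 else st.1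

theorem quick_shift (s : List Char) : ∀ (n : Int) (p f : Bool),
    s.foldl quickRfStep (n, p, f)
      = ((s.foldl quickRfStep (0, p, f)).1 + n, (s.foldl quickRfStep (0, p, f)).2) := by
  induction s with
  | nil => intro n p f; simp
  | cons c t ih =>
    intro n p f
    simp only [List.foldl_cons, quickRfStep]
    by_cases hc : c = '\n' ∨ c = '\x0d'
    · simp only [hc, if_true]
      rw [ih (if f then n + 1 else n) false false, ih (if f then (0:Int) + 1 else 0) false false]
      cases f <;> simp [Prod.ext_iff] <;> omega
    · simp only [hc, if_false]
      exact ih n _ _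

theorem quick_char_eq_iff (c d : Char) : c = d ↔ c.toNat = d.toNat := by
  constructor
  · intro h; rw [h]
  · intro h
    apply Char.ext
    apply UInt32.toNat_inj.mp
    exact h

theorem quick_M (isB : Char → Bool)
    (hB : ∀ c, pvDomChar c = true → isB c = decide (c = '\n' ∨ c = '\x0d')) :
    ∀ (s cur : List Char) (acc : List (List Char)), (∀ c ∈ s, pvDomChar c = true) →
    ((PySem.Chars.splitlines.go isB s cur acc).countP quickPRF : Int)
      = (acc.countP quickPRF : Int) +
        quickFlush (s.foldl quickRfStep (0, cur.head? == some 'R', quickHasRF cur.reverse)) := by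
  intro s cur acc
  induction s, cur, acc using PySem.Chars.splitlines.go.induct (isB := isB) with
  | case1 cur acc hcur =>
    intro _
    have hc : cur = [] := by simpa using hcur
    subst hc
    rw [PySem.Chars.splitlines.go]
    simp [quickFlush, quickHasRF, List.countP_reverse]
  | case2 cur acc hcur =>
    intro _
    rw [PySem.Chars.splitlines.go]
    rw [if_neg (by simp_all)]
    rw [List.countP_reverse]
    simp only [List.countP_cons, List.foldl_nil, quickFlush]
    have hbr : quickPRF cur.reverse = quickHasRF cur.reverse := (quick_hasRF_eq_isIn cur.reverse).symm
    cases hh : quickHasRF cur.reverse <;> rw [hbr, hh] <;> simp <;> omega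
  | case3 rest cur acc ih =>
    intro hdom
    rw [PySem.Chars.splitlines.go]
    rw [ih (fun c hc => hdom c (by simp [hc]))]
    simp only [List.countP_cons, List.foldl_cons]
    have e1 : quickRfStep (0, cur.head? == some 'R', quickHasRF cur.reverse) '\x0d'
        = ((if quickHasRF cur.reverse then (0:Int) + 1 else 0), false, false) := by
      simp [quickRfStep]
    have e2 : ∀ n : Int, quickRfStep (n, false, false) '\n' = (n, false, false) := by
      intro n; simp [quickRfStep]
    rw [e1, e2]
    rw [quick_shift rest (if quickHasRF cur.reverse then (0:Int) + 1 else 0) false false]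
    have hbr : quickPRF cur.reverse = quickHasRF cur.reverse := (quick_hasRF_eq_isIn cur.reverse).symm
    simp only [quickFlush, hbr]
    cases hh : quickHasRF cur.reverse <;>
      cases hf : (rest.foldl quickRfStep (0, false, false)).2.2 <;>
      simp [hh, hf, quickHasRF] <;> omega
  | case4 c rest cur acc hguard hc ih =>
    intro hdom
    have hcb : c = '\n' ∨ c = '\x0d' := by
      have := hB c (hdom c (by simp))
      rw [hc] at this
      have := of_decide_eq_true this.symm
      tauto
    rw [PySem.Chars.splitlines.go]
    simp only [hc, if_true]
    rw [ih (fun c' hc' => hdom c' (by simp [hc']))]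
    simp only [List.countP_cons, List.foldl_cons]
    have e1 : quickRfStep (0, cur.head? == some 'R', quickHasRF cur.reverse) c
        = ((if quickHasRF cur.reverse then (0:Int) + 1 else 0), false, false) := by
      simp [quickRfStep, hcb]
    rw [e1]
    rw [quick_shift rest (if quickHasRF cur.reverse then (0:Int) + 1 else 0) false false]
    have hbr : quickPRF cur.reverse = quickHasRF cur.reverse := (quick_hasRF_eq_isIn cur.reverse).symm
    simp only [quickFlush, hbr]
    cases hh : quickHasRF cur.reverse <;>
      cases hf : (rest.foldl quickRfStep (0, false, false)).2.2 <;>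
      simp [hh, hf, quickHasRF] <;> omega
    exact hguard
  | case5 c rest cur acc hguard hc ih =>
    intro hdom
    have hcb : ¬ (c = '\n' ∨ c = '\x0d') := by
      have := hB c (hdom c (by simp))
      intro hor
      rw [decide_eq_true hor] at this
      exact hc this
    rw [PySem.Chars.splitlines.go]
    simp only [hc, Bool.false_eq_true, ite_false]
    rw [ih (fun c' hc' => hdom c' (by simp [hc']))]
    rw [List.foldl_cons]
    have e1 : quickRfStep (0, cur.head? == some 'R', quickHasRF cur.reverse) c
        = (0, c == 'R', quickHasRF cur.reverse || ((cur.head? == some 'R') && c == 'F')) := by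
      simp [quickRfStep, hcb]
    rw [e1]
    have e2 : ((c :: cur).head? == some 'R') = (c == 'R') := by simp
    have e3 : quickHasRF (c :: cur).reverse
        = (quickHasRF cur.reverse || ((cur.head? == some 'R') && c == 'F')) := by
      rw [List.reverse_cons, quick_hasRF_append, List.getLast?_reverse]
    rw [e2, e3]
    exact hguard

theorem quick_isB_dom (c : Char) (h : pvDomChar c = true) :
    (decide (c.toNat = 10) || decide (c.toNat = 13) || decide (c.toNat = 11) || decide (c.toNat = 12) ||
     decide (c.toNat = 28) || decide (c.toNat = 29) || decide (c.toNat = 30) || decide (c.toNat = 133) ||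
     decide (c.toNat = 8232) || decide (c.toNat = 8233))
      = decide (c = '\n' ∨ c = '\x0d') := by
  have hp : (32 ≤ c.toNat ∧ c.toNat ≤ 126) ∨ c.toNat = 9 ∨ c.toNat = 10 ∨ c.toNat = 13 := by
    simp only [pvDomChar, Bool.or_eq_true, Bool.and_eq_true, decide_eq_true_eq, beq_iff_eq] at h
    tauto
  rw [Bool.decide_or]
  have h10 : decide (c = '\n') = decide (c.toNat = 10) := by
    apply decide_eq_decide.mpr
    rw [quick_char_eq_iff, show '\n'.toNat = 10 from by decide]
  have h13 : decide (c = '\x0d') = decide (c.toNat = 13) := by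
    apply decide_eq_decide.mpr
    rw [quick_char_eq_iff, show '\x0d'.toNat = 13 from by decide]
  rw [h10, h13,
    decide_eq_false (show ¬ c.toNat = 11 by omega),
    decide_eq_false (show ¬ c.toNat = 12 by omega),
    decide_eq_false (show ¬ c.toNat = 28 by omega),
    decide_eq_false (show ¬ c.toNat = 29 by omega),
    decide_eq_false (show ¬ c.toNat = 30 by omega),
    decide_eq_false (show ¬ c.toNat = 133 by omega),
    decide_eq_false (show ¬ c.toNat = 8232 by omega),
    decide_eq_false (show ¬ c.toNat = 8233 by omega)]
  simp

theorem quick_scan_eq_splitlines (s : String) (hdom : ∀ c ∈ s.toList, pvDomChar c = true) :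
    quickRfScan s
      = ((PySem.Chars.splitlines s.toList).countP quickPRF : Int) := by
  unfold PySem.Chars.splitlines
  rw [quick_M _ (fun c hc => quick_isB_dom c hc) s.toList [] [] hdom]
  simp [quickRfScan, quickFlush, quickHasRF]

-- ---- assembly ----
theorem quick_rf_eq (t : String) (hdom : ∀ c ∈ t.toList, pvDomChar c = true) :
    (PySem.Str.splitlines t).foldl (fun acc line => if PySem.Str.isIn "RF" line then acc + 1 else acc) (0 : Int)
      = quickRfScan t := by
  rw [PySem.List.foldl_if_add_one]
  rw [quick_scan_eq_splitlines t hdom]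
  have hc : (PySem.Str.splitlines t).countP (fun line => PySem.Str.isIn "RF" line)
      = (PySem.Chars.splitlines t.toList).countP quickPRF := by
    rw [← PySem.Str.splitlines_map_toList, List.countP_map]
    apply List.countP_congr
    intro line _
    simp [quickPRF, Function.comp, PySem.Str.isIn_eq]
  rw [hc]
  omega

theorem quick_score_eq (low : String) (rf : Int) :
    ((PySem.Dict.ofList
      [("nomine", (2:Int)), ("matching", 2), ("cas", 1), ("sas", 1),
       ("backlog", 2), ("gui", 1), ("db", 1),
       ("design thinking", 2), ("microservizi", 2)]).items.foldl
        (fun acc kw => acc + (PySem.Str.count low kw.1 : Int) * kw.2) 0) + rf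
      = quickKeywordsB.foldl (fun acc kw => acc + (quickCountNonoverlap low kw.1 : Int) * kw.2) rf := by
  have hitems : (PySem.Dict.ofList
      [("nomine", (2:Int)), ("matching", 2), ("cas", 1), ("sas", 1),
       ("backlog", 2), ("gui", 1), ("db", 1),
       ("design thinking", 2), ("microservizi", 2)]).items
      = quickKeywordsB := by decide
  rw [hitems]
  simp only [quickKeywordsB, List.foldl]
  rw [quick_countNonoverlap_eq low "nomine" (by decide),
      quick_countNonoverlap_eq low "matching" (by decide),
      quick_countNonoverlap_eq low "cas" (by decide),
      quick_countNonoverlap_eq low "sas" (by decide),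
      quick_countNonoverlap_eq low "backlog" (by decide),
      quick_countNonoverlap_eq low "gui" (by decide),
      quick_countNonoverlap_eq low "db" (by decide),
      quick_countNonoverlap_eq low "design thinking" (by decide),
      quick_countNonoverlap_eq low "microservizi" (by decide)]
  ring

theorem quick_score_nonneg (low : String) (rf : Int) (hrf : 0 ≤ rf) :
    0 ≤ quickKeywordsB.foldl (fun acc kw => acc + (quickCountNonoverlap low kw.1 : Int) * kw.2) rf := by
  simp only [quickKeywordsB, List.foldl]
  have h1 : 0 ≤ (quickCountNonoverlap low "nomine" : Int) := Int.natCast_nonneg _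
  have h2 : 0 ≤ (quickCountNonoverlap low "matching" : Int) := Int.natCast_nonneg _
  have h3 : 0 ≤ (quickCountNonoverlap low "cas" : Int) := Int.natCast_nonneg _
  have h4 : 0 ≤ (quickCountNonoverlap low "sas" : Int) := Int.natCast_nonneg _
  have h5 : 0 ≤ (quickCountNonoverlap low "backlog" : Int) := Int.natCast_nonneg _
  have h6 : 0 ≤ (quickCountNonoverlap low "gui" : Int) := Int.natCast_nonneg _
  have h7 : 0 ≤ (quickCountNonoverlap low "db" : Int) := Int.natCast_nonneg _
  have h8 : 0 ≤ (quickCountNonoverlap low "design thinking" : Int) := Int.natCast_nonneg _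
  have h9 : 0 ≤ (quickCountNonoverlap low "microservizi" : Int) := Int.natCast_nonneg _
  nlinarith

theorem quick_rfScan_nonneg (t : String) : 0 ≤ quickRfScan t := by
  unfold quickRfScan
  have key : ∀ (l : List Char) (n : Int) (p f : Bool), 0 ≤ n →
      0 ≤ (l.foldl quickRfStep (n, p, f)).1 := by
    intro l
    induction l with
    | nil => intro n p f h; simpa using h
    | cons c t ih =>
      intro n p f h
      simp only [List.foldl_cons, quickRfStep]
      by_cases hc : c = '\n' ∨ c = '\x0d'
      · simp only [hc, if_true]
        apply ih
        cases f <;> simp <;> omega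
      · simp only [hc, if_false]
        exact ih n _ _ h
  have := key t.toList 0 false false le_rfl
  have hz : (if (t.toList.foldl quickRfStep (0, false, false)).2.2 then
        (t.toList.foldl quickRfStep (0, false, false)).1 + 1
      else (t.toList.foldl quickRfStep (0, false, false)).1)
      = (let st := t.toList.foldl quickRfStep (0, false, false);
         if st.2.2 then st.1 + 1 else st.1) := rfl
  rw [← hz]
  split <;> omega

theorem quick_range_eq (s : Int) (hs : 0 ≤ s) : quickLadderA s = quickRangeB s := by
  unfold quickLadderA quickRangeB
  simp only [PySem.Int.floordiv]
  have hfd : Int.fdiv s 5 = s / 5 := by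
    rw [Int.fdiv_eq_ediv]; simp
  rw [hfd]
  by_cases h1 : s < 5
  · have hb : min (s / 5) 4 = 0 := by omega
    rw [hb, if_pos h1]; decide
  · by_cases h2 : s < 10
    · have hb : min (s / 5) 4 = 1 := by omega
      rw [hb, if_neg h1, if_pos h2]; decide
    · by_cases h3 : s < 15
      · have hb : min (s / 5) 4 = 2 := by omega
        rw [hb, if_neg h1, if_neg h2, if_pos h3]; decide
      · by_cases h4 : s < 20
        · have hb : min (s / 5) 4 = 3 := by omega
          rw [hb, if_neg h1, if_neg h2, if_neg h3, if_pos h4]; decide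
        · have hb : min (s / 5) 4 = 4 := by omega
          rw [hb, if_neg h1, if_neg h2, if_neg h3, if_neg h4]; decide

-- ===== VERDICT (by name: the statement is the Claim_ definition above) =====
theorem quick_pre_analysis_spec : Claim_equal_quick_pre_analysis := by
  intro t hdom
  have hd : ∀ c ∈ t.toList, pvDomChar c = true := by
    simpa [Dom_quick_pre_analysis, pvDomStr, List.all_eq_true] using hdom
  show quick_pre_analysis t = quick_pre_analysis_alt t
  simp only [quick_pre_analysis, quick_pre_analysis_alt]
  rw [quick_rf_eq t hd, quick_score_eq, quick_range_eq]
  exact quick_score_nonneg _ _ (quick_rfScan_nonneg t)
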